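-- pv_equiv track=rewrite | github.com/sdwh/codewarsPython | [6 kyu]Moduli number system.py | fromNb2Str
-- ===== SOURCE A (Python) =====
-- from functools import reduce
--
-- def fromNb2Str(n, modsys):
--     prime = [i for num in modsys for i in range(2,num+1) if num%i == 0]
--     for p in prime:
--         if prime.count(p) > 1:
--             return 'Not applicable'
--
--     if reduce(lambda x,y:x*y, modsys) < n:
--         return 'Not applicable'
--     return '-' + '--'.join([str(n%num) for num in modsys]) + '-'
-- ===== SOURCE B (Python) =====
-- def _gcd(a, b):
--     return abs(a) if b == 0 else _gcd(b, a % b)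
--
-- def fromNb2Str(n, modsys):
--     for i in range(len(modsys)):
--         for j in range(i + 1, len(modsys)):
--             a, b = modsys[i], modsys[j]
--             if a > 1 and b > 1 and _gcd(a, b) > 1:
--                 return 'Not applicable'
--     prod = 1
--     for num in modsys:
--         prod *= num
--     if prod < n:
--         return 'Not applicable'
--     return '-' + '--'.join(str(n % num) for num in modsys) + '-'
-- ===== Notes on version B (the rewrite author's own statement) =====
-- stated objective: faster
-- what changed: A's coprimality test enumerates every candidate divisor 2..num of every modulus into one big list and then counts duplicates in it; B instead checks each pair of moduli once with a hand-written Euclid gcd, keeps a running product instead of reduce, and emits the identical encoding.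
import Mathlib
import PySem

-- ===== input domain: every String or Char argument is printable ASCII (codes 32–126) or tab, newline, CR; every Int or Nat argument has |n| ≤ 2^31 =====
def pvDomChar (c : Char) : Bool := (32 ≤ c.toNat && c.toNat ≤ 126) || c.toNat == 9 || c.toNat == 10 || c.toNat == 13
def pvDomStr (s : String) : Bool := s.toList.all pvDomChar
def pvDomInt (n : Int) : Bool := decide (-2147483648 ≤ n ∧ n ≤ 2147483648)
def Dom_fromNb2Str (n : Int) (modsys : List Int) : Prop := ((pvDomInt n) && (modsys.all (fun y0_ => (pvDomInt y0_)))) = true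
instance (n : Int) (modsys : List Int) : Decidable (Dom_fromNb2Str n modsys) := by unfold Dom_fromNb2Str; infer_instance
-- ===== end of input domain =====

-- B replaces A's divisor-enumeration duplicate test (walking every i in 2..num for each modulus,
-- then counting over that table) by a direct pairwise-gcd check; the rest is unchanged.

-- ===== PORT A =====
-- prime = [i for num in modsys for i in range(2,num+1) if num%i == 0]
def pvDivisors (num : Int) : List Int :=
  (PySem.List.pyRange 2 (num + 1) 1).filter (fun i => PySem.Int.mod num i == 0)

def fromNb2Str (n : Int) (modsys : List Int) : String :=
  let prime := modsys.flatMap pvDivisors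
  -- for p in prime: if prime.count(p) > 1: return 'Not applicable'
  if prime.any (fun p => decide (1 < PySem.List.count prime p)) then "Not applicable"
  else
    match modsys with
    | [] => ""  -- unreachable: reduce raises TypeError on an empty list (excluded by Pre_)
    | h :: t =>
      if t.foldl (· * ·) h < n then "Not applicable"
      else "-" ++ PySem.Str.join "--" (modsys.map (fun num => PySem.Int.toStr (PySem.Int.mod n num))) ++ "-"

-- ===== PORT B =====
-- def _gcd(a, b): return abs(a) if b == 0 else _gcd(b, a % b)   (on naturals after abs)
def pvGcdNat (a b : Nat) : Nat :=
  if b = 0 then a else pvGcdNat b (a % b)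
termination_by b
decreasing_by exact Nat.mod_lt _ (Nat.pos_of_ne_zero (by assumption))

def pvGcd (a b : Int) : Int := ((pvGcdNat a.natAbs b.natAbs : Nat) : Int)

-- the nested index loops: for each i, scan j > i for a pair of moduli > 1 with gcd > 1
def pvHasShared : List Int → Bool
  | [] => false
  | a :: rest =>
      rest.any (fun b => decide (1 < a) && decide (1 < b) && decide (1 < pvGcd a b)) || pvHasShared rest

def fromNb2Str_alt (n : Int) (modsys : List Int) : String :=
  if pvHasShared modsys then "Not applicable"
  else if modsys.foldl (· * ·) 1 < n then "Not applicable"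
  else "-" ++ PySem.Str.join "--" (modsys.map (fun num => PySem.Int.toStr (PySem.Int.mod n num))) ++ "-"

-- ===== PRECONDITION & SPEC =====
-- Pre_ excludes exactly the inputs where the Python A raises: the empty modsys (reduce raises
-- TypeError) and the inputs where a modulus 0 together with n ≤ 0 reaches n % 0
-- (ZeroDivisionError), i.e. 0 ∈ modsys, n ≤ 0 and the duplicate-divisor test did not return first.
def Pre_fromNb2Str (n : Int) (modsys : List Int) : Prop :=
  modsys ≠ [] ∧
  ¬((0 : Int) ∈ modsys ∧ n ≤ 0 ∧
     List.Pairwise (fun a b => a ≤ 1 ∨ b ≤ 1 ∨ Int.gcd a b ≤ 1) modsys)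
instance (n : Int) (modsys : List Int) : Decidable (Pre_fromNb2Str n modsys) := by
  unfold Pre_fromNb2Str; infer_instance

def pvWitness_fromNb2Str : Int × List Int := (5, [2, 3])

def Spec_fromNb2Str (n : Int) (modsys : List Int) (out : String) : Prop := out = fromNb2Str_alt n modsys
instance (n : Int) (modsys : List Int) (out : String) : Decidable (Spec_fromNb2Str n modsys out) := by unfold Spec_fromNb2Str; infer_instance

-- ===== CLAIM (what is proved, stated in full; the proofs are below) =====
def Claim_equal_fromNb2Str : Prop := ∀ (n : Int) (modsys : List Int), Dom_fromNb2Str n modsys → Pre_fromNb2Str n modsys → Spec_fromNb2Str n modsys (fromNb2Str n modsys)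

-- ===== LEMMAS AND PROOFS =====

-- the hand-written Euclid recursion computes Nat.gcd
theorem pvGcdNat_eq (a b : Nat) : pvGcdNat a b = Nat.gcd a b := by
  induction b using Nat.strong_induction_on generalizing a with
  | _ b ih =>
    rw [pvGcdNat]
    by_cases hb : b = 0
    · simp [hb]
    · simp only [hb, if_false]
      rw [ih (a % b) (Nat.mod_lt _ (Nat.pos_of_ne_zero hb))]
      rw [Nat.gcd_comm b (a % b), ← Nat.gcd_rec, Nat.gcd_comm]

theorem mem_pvDivisors {p num : Int} :
    p ∈ pvDivisors num ↔ 2 ≤ p ∧ p < num + 1 ∧ p ∣ num := by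
  simp [pvDivisors, List.mem_filter, PySem.List.mem_pyRange_one,
    ← PySem.Int.mod_eq_zero_iff_dvd, and_assoc]

theorem nodup_pvDivisors (num : Int) : (pvDivisors num).Nodup :=
  (PySem.List.nodup_pyRange_one 2 (num + 1)).filter _

-- a shared divisor ≥ 2 between two moduli is exactly: both > 1 with gcd > 1
theorem shared_iff {a b : Int} :
    (∃ p, p ∈ pvDivisors a ∧ p ∈ pvDivisors b) ↔ (1 < a ∧ 1 < b ∧ 1 < (Int.gcd a b : Int)) := by
  constructor
  · rintro ⟨p, hpa, hpb⟩
    rw [mem_pvDivisors] at hpa hpb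
    obtain ⟨hp2, hpa1, hpda⟩ := hpa
    obtain ⟨-, hpb1, hpdb⟩ := hpb
    have ha : 1 < a := by have := Int.le_of_dvd (by omega) hpda; omega
    have hb : 1 < b := by have := Int.le_of_dvd (by omega) hpdb; omega
    have hdg : p ∣ (Int.gcd a b : Int) := Int.dvd_coe_gcd hpda hpdb
    have hgpos : (0 : Int) < (Int.gcd a b : Int) := by
      exact_mod_cast Nat.pos_of_ne_zero (fun h => by
        have := Int.gcd_eq_zero_iff.mp h; omega)
    have := Int.le_of_dvd hgpos hdg
    exact ⟨ha, hb, by omega⟩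
  · rintro ⟨ha, hb, hg⟩
    refine ⟨(Int.gcd a b : Int), ?_, ?_⟩ <;> rw [mem_pvDivisors]
    · exact ⟨by omega,
        by have := Int.le_of_dvd (by omega) (Int.gcd_dvd_left a b); omega,
        Int.gcd_dvd_left a b⟩
    · exact ⟨by omega,
        by have := Int.le_of_dvd (by omega) (Int.gcd_dvd_right a b); omega,
        Int.gcd_dvd_right a b⟩

-- B's pair test as a Prop
theorem pair_test_iff {a b : Int} :
    (decide (1 < a) && decide (1 < b) && decide (1 < pvGcd a b)) = true ↔
      (1 < a ∧ 1 < b ∧ 1 < (Int.gcd a b : Int)) := by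
  simp [pvGcd, pvGcdNat_eq, Int.gcd, and_assoc]

-- A's duplicate scan says exactly: the flattened divisor table is not Nodup
theorem anyCount_iff (l : List Int) :
    (l.any (fun p => decide (1 < PySem.List.count l p))) = true ↔ ¬ l.Nodup := by
  rw [List.nodup_iff_count_le_one]
  simp only [List.any_eq_true, PySem.List.count_eq, decide_eq_true_eq]
  constructor
  · rintro ⟨p, -, hc⟩ h
    exact absurd (h p) (by omega)
  · intro h
    push Not at h
    obtain ⟨p, hc⟩ := h
    exact ⟨p, List.count_pos_iff.mp (by omega), by omega⟩

theorem not_nodup_flatMap_iff (ms : List Int) :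
    ¬ (ms.flatMap pvDivisors).Nodup ↔ pvHasShared ms = true := by
  induction ms with
  | nil => simp [pvHasShared]
  | cons a t ih =>
    rw [List.flatMap_cons, List.nodup_append, pvHasShared, Bool.or_eq_true, ← ih]
    have hnd := nodup_pvDivisors a
    constructor
    · intro h
      by_cases htn : (t.flatMap pvDivisors).Nodup
      · left
        have hdisj : ¬ ∀ x ∈ pvDivisors a, ∀ y ∈ t.flatMap pvDivisors, x ≠ y :=
          fun hd => h ⟨hnd, htn, hd⟩
        push Not at hdisj
        obtain ⟨p, hpa, q, hqt, heq⟩ := hdisj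
        subst heq
        rw [List.mem_flatMap] at hqt
        obtain ⟨b, hbt, hpb⟩ := hqt
        rw [List.any_eq_true]
        exact ⟨b, hbt, pair_test_iff.mpr (shared_iff.mp ⟨p, hpa, hpb⟩)⟩
      · right; exact htn
    · rintro (hany | hnt)
      · rw [List.any_eq_true] at hany
        obtain ⟨b, hbt, hb⟩ := hany
        obtain ⟨p, hpa, hpb⟩ := shared_iff.mpr (pair_test_iff.mp hb)
        intro hcon
        exact hcon.2.2 p hpa p (List.mem_flatMap.mpr ⟨b, hbt, hpb⟩) rfl
      · exact fun hcon => hnt hcon.2.1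

-- ===== VERDICT (by name: the statement is the Claim_ definition above) =====
theorem fromNb2Str_spec : Claim_equal_fromNb2Str := by
  intro n ms hdom hpre
  unfold Spec_fromNb2Str
  obtain ⟨hne, -⟩ := hpre
  rcases ms with _ | ⟨h, t⟩
  · exact absurd rfl hne
  · unfold fromNb2Str fromNb2Str_alt
    dsimp only
    have htest :
        (((h :: t).flatMap pvDivisors).any
          (fun p => decide (1 < PySem.List.count ((h :: t).flatMap pvDivisors) p)))
          = pvHasShared (h :: t) := by
      rw [Bool.eq_iff_iff, anyCount_iff, not_nodup_flatMap_iff]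
    rw [htest, List.foldl_cons, one_mul]
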